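-- pv_equiv track=rewrite | github.com/OpenGVLab/EgoVideo | eccv-2022/scod/mmdet/models/backbones/swin_transformer_v2.py | get_final_norm_indexs
-- ===== SOURCE A (Python) =====
-- def get_final_norm_indexs(depths, interval=6):
--     """
--     :param depths: [2,2,42,4]
--     :param interval: 6
--     :return: [[], [], [1, 7, 13, 19, 25, 31, 37], [1]]
--     """
--     max_index = sum(depths) // interval
--     indexs = [interval * i - 1 for i in range(1, max_index + 1)]
--
--     y = [sum(depths[0:i + 1]) for i, x in enumerate(depths)]  # max index in each stage
--
--     final_norm_indexs = []
--     for i in range(4):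
--         k = []
--         for idx in indexs:
--             if idx < y[i]:
--                 a = idx - y[i - 1] if i > 0 else idx
--                 k.append(a)
--             else:
--                 break
--         for i in range(len(k)):
--             indexs.pop(0)
--         final_norm_indexs.append(k)
--     return final_norm_indexs
-- ===== SOURCE B (Python) =====
-- def get_final_norm_indexs(depths, interval=6):
--     # single forward pass: generate candidates on the fly and assign each to a
--     # stage by advancing a monotone stage pointer over running depth sums
--     y = []
--     t = 0
--     for d in depths:
--         t += d
--         y.append(t)
--     n = t // interval
--     out = [[], [], [], []]
--     s = 0
--     for j in range(1, n + 1):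
--         idx = interval * j - 1
--         while s < 4 and idx >= y[s]:
--             s += 1
--         if s == 4:
--             break
--         out[s].append(idx - (y[s - 1] if s > 0 else 0))
--     return out
-- ===== Notes on version B (the rewrite author's own statement) =====
-- stated objective: faster
-- what changed: Replaced the four-stage queue consumption (repeated pop(0)) over a pre-built candidate list with quadratic per-stage prefix-sum recomputation by a single forward pass that builds running sums once and assigns each candidate, generated on the fly, via a monotone stage pointer.
import Mathlib
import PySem

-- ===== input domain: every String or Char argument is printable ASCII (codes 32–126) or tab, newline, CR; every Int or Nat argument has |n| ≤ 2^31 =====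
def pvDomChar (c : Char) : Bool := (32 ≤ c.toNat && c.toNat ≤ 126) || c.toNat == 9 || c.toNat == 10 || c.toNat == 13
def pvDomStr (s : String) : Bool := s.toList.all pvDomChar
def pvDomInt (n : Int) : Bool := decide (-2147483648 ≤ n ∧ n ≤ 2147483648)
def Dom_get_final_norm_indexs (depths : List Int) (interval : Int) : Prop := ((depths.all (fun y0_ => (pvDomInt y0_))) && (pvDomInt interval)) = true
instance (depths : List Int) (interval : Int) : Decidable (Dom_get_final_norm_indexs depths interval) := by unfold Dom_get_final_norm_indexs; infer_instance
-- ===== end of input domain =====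

-- B replaces A's four-stage queue consumption (pop(0)) and quadratic prefix-sum list by one
-- forward pass with running sums and a monotone stage pointer; equal wherever A returns.

-- ===== PORT A =====
-- `for i in range(len(k)): indexs.pop(0)` : pop(0) on a nonempty list is tail; the count
-- popped (k.length) never exceeds the list length, so tail is exact here.
def pvPopN : Nat → List Int → List Int
  | 0, xs => xs
  | n + 1, xs => pvPopN n xs.tail

-- inner `for idx in indexs: if idx < y[i]: k.append(...) else: break`
-- y.getD i 0 : Python y[i] raises IndexError for i ≥ len y (excluded by Pre_); default 0 there.
def pvCollect (inds : List Int) (y : List Int) (i : Nat) : List Int :=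
  match inds with
  | [] => []
  | idx :: rest =>
      if idx < y.getD i 0 then
        (if 0 < i then idx - y.getD (i - 1) 0 else idx) :: pvCollect rest y i
      else []

-- outer `for i in range(4)` loop, carrying (indexs, accumulated result)
def pvStagesA (stages : List Nat) (inds : List Int) (y : List Int) : List (List Int) :=
  match stages with
  | [] => []
  | i :: rest =>
      let k := pvCollect inds y i
      k :: pvStagesA rest (pvPopN k.length inds) y

def get_final_norm_indexs (depths : List Int) (interval : Int) : List (List Int) :=
  -- interval = 0 raises ZeroDivisionError in Python (excluded by Pre_); floordiv is total junk there
  let maxIndex := PySem.Int.floordiv depths.sum interval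
  let indexs := (PySem.List.pyRange 1 (maxIndex + 1) 1).map (fun i => interval * i - 1)
  let y := (List.range depths.length).map (fun (i : Nat) => (PySem.List.slice depths (some 0) (some ((i : Int) + 1))).sum)
  pvStagesA (List.range 4) indexs y

-- ===== PORT B =====
-- running-sums loop: returns (y, final total t)
def pvAccum : List Int → Int → List Int × Int
  | [], t => ([], t)
  | d :: r, t =>
      let p := pvAccum r (t + d)
      ((t + d) :: p.1, p.2)

-- `while s < 4 and idx >= y[s]: s += 1`  (y.getD s 0: IndexError cases excluded by Pre_)
def pvAdvance (y : List Int) (idx : Int) (s : Nat) : Nat :=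
  if h : s < 4 ∧ y.getD s 0 ≤ idx then pvAdvance y idx (s + 1) else s
termination_by 4 - s
decreasing_by omega

-- `out[s].append(v)`
def pvAppendAt (out : List (List Int)) (s : Nat) (v : Int) : List (List Int) :=
  out.set s (out.getD s [] ++ [v])

-- `for j in range(1, n+1): ...`
def pvRun (js : List Int) (interval : Int) (y : List Int) (s : Nat) (out : List (List Int)) : List (List Int) :=
  match js with
  | [] => out
  | j :: rest =>
      let idx := interval * j - 1
      let s' := pvAdvance y idx s
      if s' = 4 then out
      else pvRun rest interval y s' (pvAppendAt out s' (idx - (if 0 < s' then y.getD (s' - 1) 0 else 0)))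

def get_final_norm_indexs_alt (depths : List Int) (interval : Int) : List (List Int) :=
  let p := pvAccum depths 0
  let n := PySem.Int.floordiv p.2 interval
  pvRun (PySem.List.pyRange 1 (n + 1) 1) interval p.1 0 [[], [], [], []]

-- ===== PRECONDITION & SPEC =====
-- the candidate list and the prefix-sum list, as closed-form comprehensions over the input
def pvCandsPre (depths : List Int) (interval : Int) : List Int :=
  (PySem.List.pyRange 1 (PySem.Int.floordiv depths.sum interval + 1) 1).map (fun i => interval * i - 1)
def pvCumsPre (depths : List Int) : List Int :=
  (List.range depths.length).map (fun i => (depths.take (i + 1)).sum)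

-- Pre_ excludes exactly the inputs where A raises: interval = 0 (ZeroDivisionError), and
-- fewer than 4 depths with some candidate index not below every prefix sum (IndexError on y[i]).
def Pre_get_final_norm_indexs (depths : List Int) (interval : Int) : Prop :=
  interval ≠ 0 ∧ (4 ≤ depths.length ∨ ∀ c ∈ pvCandsPre depths interval, ∃ t ∈ pvCumsPre depths, c < t)
instance (depths : List Int) (interval : Int) : Decidable (Pre_get_final_norm_indexs depths interval) := by
  unfold Pre_get_final_norm_indexs; infer_instance

def pvWitness_get_final_norm_indexs : List Int × Int := ([2, 2, 42, 4], 6)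

def Spec_get_final_norm_indexs (depths : List Int) (interval : Int) (out : List (List Int)) : Prop := out = get_final_norm_indexs_alt depths interval
instance (depths : List Int) (interval : Int) (out : List (List Int)) : Decidable (Spec_get_final_norm_indexs depths interval out) := by unfold Spec_get_final_norm_indexs; infer_instance

-- ===== CLAIM (what is proved, stated in full; the proofs are below) =====
def Claim_equal_get_final_norm_indexs : Prop := ∀ (depths : List Int) (interval : Int), Dom_get_final_norm_indexs depths interval → Pre_get_final_norm_indexs depths interval → Spec_get_final_norm_indexs depths interval (get_final_norm_indexs depths interval)

-- ===== LEMMAS AND PROOFS =====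

-- `pvMerge out s gs` appends the groups gs elementwise to out starting at index s
def pvMerge : List (List Int) → Nat → List (List Int) → List (List Int)
  | out, _, [] => out
  | [], _, _ :: _ => []
  | o :: os, 0, g :: gs => (o ++ g) :: pvMerge os 0 gs
  | o :: os, n + 1, g :: gs => o :: pvMerge os n (g :: gs)

theorem pvAccum_snd : ∀ (ds : List Int) (t : Int), (pvAccum ds t).2 = t + ds.sum := by
  intro ds
  induction ds with
  | nil => simp [pvAccum]
  | cons d r ih => intro t; simp [pvAccum, ih (t + d)]; ring

theorem pvAccum_fst : ∀ (ds : List Int) (t : Int),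
    (pvAccum ds t).1 = (List.range ds.length).map (fun i => t + (ds.take (i + 1)).sum) := by
  intro ds
  induction ds with
  | nil => simp [pvAccum]
  | cons d r ih =>
      intro t
      simp only [pvAccum, ih (t + d), List.length_cons, List.range_succ_eq_map, List.map_cons,
        List.map_map]
      congr 1
      · simp
      · apply List.map_congr_left
        intro i _
        simp [Function.comp, List.take_succ_cons]
        ring

theorem pvAdvance_ge (y : List Int) (idx : Int) (s : Nat) : s ≤ pvAdvance y idx s := by
  unfold pvAdvance
  split
  · have := pvAdvance_ge y idx (s + 1); omega
  · omega
termination_by 4 - s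
decreasing_by omega

theorem pvAdvance_le (y : List Int) (idx : Int) (s : Nat) (hs : s ≤ 4) : pvAdvance y idx s ≤ 4 := by
  unfold pvAdvance
  split
  · next h => exact pvAdvance_le y idx (s + 1) (by omega)
  · omega
termination_by 4 - s
decreasing_by omega

theorem pvAdvance_lt (y : List Int) (idx : Int) (s : Nat) (h4 : pvAdvance y idx s < 4) :
    idx < y.getD (pvAdvance y idx s) 0 := by
  by_cases h : s < 4 ∧ y.getD s 0 ≤ idx
  · rw [pvAdvance] at h4 ⊢
    rw [dif_pos h] at h4 ⊢
    exact pvAdvance_lt y idx (s + 1) h4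
  · rw [pvAdvance] at h4 ⊢
    rw [dif_neg h] at h4 ⊢
    omega
termination_by 4 - s
decreasing_by omega

theorem pvStagesA_nil (y : List Int) : ∀ (stages : List Nat),
    pvStagesA stages [] y = List.replicate stages.length [] := by
  intro stages
  induction stages with
  | nil => simp [pvStagesA]
  | cons i rest ih => simp [pvStagesA, pvCollect, pvPopN, ih, List.replicate_succ]

-- skipping stages: while idx ≥ y[t] the stage produces [] and consumes nothing
theorem pvStagesA_skip (y : List Int) (idx : Int) (rest : List Int) :
    ∀ (k s : Nat), 4 - s = k → s ≤ 4 →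
    pvStagesA (List.range' s (4 - s)) (idx :: rest) y =
      List.replicate (pvAdvance y idx s - s) [] ++
        pvStagesA (List.range' (pvAdvance y idx s) (4 - pvAdvance y idx s)) (idx :: rest) y := by
  intro k
  induction k with
  | zero =>
      intro s hk hs
      have hs4 : s = 4 := by omega
      subst hs4
      rw [pvAdvance]
      rw [dif_neg (by omega)]
      simp
  | succ k ih =>
      intro s hk hs
      by_cases h : s < 4 ∧ y.getD s 0 ≤ idx
      · rw [pvAdvance, dif_pos h]
        have hrange : List.range' s (4 - s) = s :: List.range' (s + 1) (4 - (s + 1)) := by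
          have h1 : 4 - s = (4 - (s + 1)) + 1 := by omega
          rw [h1, List.range'_succ]
        rw [hrange]
        have hcol : pvCollect (idx :: rest) y s = [] := by
          simp only [pvCollect]
          rw [if_neg (by omega)]
        rw [pvStagesA]
        simp only [hcol, List.length_nil, pvPopN]
        rw [ih (s + 1) (by omega) (by omega)]
        have hge := pvAdvance_ge y idx (s + 1)
        have hrep : pvAdvance y idx (s + 1) - s = (pvAdvance y idx (s + 1) - (s + 1)) + 1 := by omega
        rw [hrep, List.replicate_succ]
        simp
      · rw [pvAdvance, dif_neg h]
        simp

-- placing a candidate: idx < y[s] puts it at the head of stage s's group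
theorem pvStagesA_place (y : List Int) (idx : Int) (rest : List Int) (s : Nat)
    (hs : s < 4) (hlt : idx < y.getD s 0) (g : List Int) (gs : List (List Int))
    (hX : pvStagesA (List.range' s (4 - s)) rest y = g :: gs) :
    pvStagesA (List.range' s (4 - s)) (idx :: rest) y =
      ((if 0 < s then idx - y.getD (s - 1) 0 else idx) :: g) :: gs := by
  have hrange : List.range' s (4 - s) = s :: List.range' (s + 1) (4 - (s + 1)) := by
    have h1 : 4 - s = (4 - (s + 1)) + 1 := by omega
    rw [h1, List.range'_succ]
  rw [hrange] at hX ⊢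
  simp only [pvStagesA] at hX ⊢
  have hcol : pvCollect (idx :: rest) y s =
      (if 0 < s then idx - y.getD (s - 1) 0 else idx) :: pvCollect rest y s := by
    simp only [pvCollect]
    rw [if_pos hlt]
  rw [hcol]
  simp only [List.length_cons, pvPopN, List.tail_cons]
  obtain ⟨hg, hgs⟩ := List.cons_eq_cons.mp hX
  rw [hg] at hgs
  rw [hg, hgs]

-- basic pvMerge equations
theorem pvMerge_gs_nil : ∀ (out : List (List Int)) (s : Nat), pvMerge out s [] = out := by
  intro out s
  cases out <;> cases s <;> rfl

theorem pvMerge_succ (o : List Int) (os : List (List Int)) (s : Nat) (gs : List (List Int)) :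
    pvMerge (o :: os) (s + 1) gs = o :: pvMerge os s gs := by
  cases gs with
  | nil => rw [pvMerge_gs_nil, pvMerge_gs_nil]
  | cons g gs' => rfl

theorem pvMerge_zero_cons (o : List Int) (os : List (List Int)) (g : List Int) (gs : List (List Int)) :
    pvMerge (o :: os) 0 (g :: gs) = (o ++ g) :: pvMerge os 0 gs := rfl

theorem pvAppendAt_cons_succ (o : List Int) (os : List (List Int)) (s : Nat) (v : Int) :
    pvAppendAt (o :: os) (s + 1) v = o :: pvAppendAt os s v := by
  simp [pvAppendAt, List.getD]

theorem pvMerge_empty_groups : ∀ (out : List (List Int)) (s : Nat) (k : Nat),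
    s + k ≤ out.length → pvMerge out s (List.replicate k []) = out := by
  intro out
  induction out with
  | nil =>
      intro s k h
      have : k = 0 := by simp at h; omega
      subst this
      exact pvMerge_gs_nil _ _
  | cons o os ih =>
      intro s k h
      match s, k with
      | s, 0 => exact pvMerge_gs_nil _ _
      | 0, k + 1 =>
          rw [List.replicate_succ, pvMerge_zero_cons, ih 0 k (by simp at h ⊢; omega)]
          simp
      | s + 1, k + 1 =>
          rw [pvMerge_succ, ih s (k + 1) (by simp at h ⊢; omega)]

theorem pvMerge_replicate_append : ∀ (out : List (List Int)) (s k : Nat) (X : List (List Int)),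
    s + k ≤ out.length → pvMerge out s (List.replicate k [] ++ X) = pvMerge out (s + k) X := by
  intro out
  induction out with
  | nil =>
      intro s k X h
      have hs : s = 0 := by simp at h; omega
      have hk : k = 0 := by simp at h; omega
      subst hs; subst hk
      simp
  | cons o os ih =>
      intro s k X h
      match s, k with
      | s, 0 => simp
      | 0, k + 1 =>
          rw [List.replicate_succ, List.cons_append, pvMerge_zero_cons,
            ih 0 k X (by simp at h ⊢; omega)]
          have h1 : (0 : Nat) + (k + 1) = k + 1 := by omega
          have h2 : (0 : Nat) + k = k := by omega
          rw [h1, h2, pvMerge_succ]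
          simp
      | s + 1, k + 1 =>
          rw [pvMerge_succ, ih s (k + 1) X (by simp at h ⊢; omega)]
          have h1 : s + 1 + (k + 1) = (s + (k + 1)) + 1 := by omega
          rw [h1, pvMerge_succ]

theorem pvMerge_cons_head : ∀ (out : List (List Int)) (s : Nat) (v : Int) (g : List Int) (gs : List (List Int)),
    s < out.length → pvMerge out s ((v :: g) :: gs) = pvMerge (pvAppendAt out s v) s (g :: gs) := by
  intro out
  induction out with
  | nil => intro s v g gs h; simp at h
  | cons o os ih =>
      intro s v g gs h
      match s with
      | 0 =>
          have ha : pvAppendAt (o :: os) 0 v = (o ++ [v]) :: os := by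
            simp [pvAppendAt, List.getD]
          rw [pvMerge_zero_cons, ha, pvMerge_zero_cons]
          simp
      | s + 1 =>
          rw [pvMerge_succ, pvAppendAt_cons_succ, pvMerge_succ,
            ih s v g gs (by simp at h; omega)]

theorem pvAppendAt_length (out : List (List Int)) (s : Nat) (v : Int) :
    (pvAppendAt out s v).length = out.length := by
  simp [pvAppendAt]

theorem pvStagesA_length (y : List Int) : ∀ (stages : List Nat) (inds : List Int),
    (pvStagesA stages inds y).length = stages.length := by
  intro stages
  induction stages with
  | nil => intro inds; simp [pvStagesA]
  | cons i rest ih => intro inds; simp [pvStagesA, ih]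

-- main loop correspondence: the one-pass merge equals the stage-major consumption
theorem pvRun_eq_merge (interval : Int) (y : List Int) : ∀ (js : List Int) (s : Nat) (out : List (List Int)),
    s ≤ 4 → out.length = 4 →
    pvRun js interval y s out =
      pvMerge out s (pvStagesA (List.range' s (4 - s)) (js.map (fun j => interval * j - 1)) y) := by
  intro js
  induction js with
  | nil =>
      intro s out hs hlen
      simp only [pvRun, List.map_nil]
      rw [pvStagesA_nil, List.length_range']
      exact (pvMerge_empty_groups out s (4 - s) (by omega)).symm
  | cons j rest ih =>
      intro s out hs hlen
      simp only [pvRun, List.map_cons]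
      obtain ⟨s', hs'⟩ : ∃ t, pvAdvance y (interval * j - 1) s = t := ⟨_, rfl⟩
      have hge := pvAdvance_ge y (interval * j - 1) s
      have hle := pvAdvance_le y (interval * j - 1) s hs
      rw [hs'] at hge hle
      rw [pvStagesA_skip y (interval * j - 1) _ (4 - s) s rfl hs]
      rw [hs']
      rw [pvMerge_replicate_append out s (s' - s) _ (by omega)]
      rw [show s + (s' - s) = s' from by omega]
      by_cases h4 : s' = 4
      · subst h4
        rw [if_pos rfl]
        norm_num [pvStagesA, pvMerge_gs_nil]
      · rw [if_neg h4]
        have hs'4 : s' < 4 := by omega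
        have hlt : (interval * j - 1) < y.getD s' 0 := by
          have := pvAdvance_lt y (interval * j - 1) s (by rw [hs']; omega)
          rw [hs'] at this
          exact this
        cases hX : pvStagesA (List.range' s' (4 - s')) (rest.map (fun j => interval * j - 1)) y with
        | nil =>
            exfalso
            have hL := pvStagesA_length y (List.range' s' (4 - s')) (rest.map (fun j => interval * j - 1))
            rw [hX] at hL
            simp [List.length_range'] at hL
            omega
        | cons g gs =>
            rw [pvStagesA_place y (interval * j - 1) _ s' hs'4 hlt g gs hX]
            have hval : (interval * j - 1 - if 0 < s' then y.getD (s' - 1) 0 else 0)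
                = (if 0 < s' then interval * j - 1 - y.getD (s' - 1) 0 else interval * j - 1) := by
              split_ifs <;> ring
            rw [hval]
            rw [pvMerge_cons_head out s' _ g gs (by omega)]
            rw [ih s' _ (by omega) (by rw [pvAppendAt_length]; exact hlen)]
            rw [hX]

-- A's y list equals B's running-sum list
theorem pvY_eq (depths : List Int) :
    (List.range depths.length).map (fun (i : Nat) => (PySem.List.slice depths (some 0) (some ((i : Int) + 1))).sum)
      = (pvAccum depths 0).1 := by
  rw [pvAccum_fst]
  apply List.map_congr_left
  intro i _
  have h1 : ((i : Int) + 1) = (((i + 1 : Nat) : Int)) := by push_cast; ring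
  have h0 : (0 : Int) = ((0 : Nat) : Int) := rfl
  rw [h1, h0, PySem.List.slice_natCast]
  simp

theorem pvMerge_zero_empties : ∀ (gs : List (List Int)),
    pvMerge (List.replicate gs.length []) 0 gs = gs := by
  intro gs
  induction gs with
  | nil => simp [pvMerge]
  | cons g rest ih => simp [List.replicate_succ, pvMerge, ih]

theorem pvMerge_four (gs : List (List Int)) (h : gs.length = 4) :
    pvMerge [[], [], [], []] 0 gs = gs := by
  have := pvMerge_zero_empties gs
  rw [h] at this
  exact this

-- ===== VERDICT (by name: the statement is the Claim_ definition above) =====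
theorem get_final_norm_indexs_spec : Claim_equal_get_final_norm_indexs := by
  intro depths interval _ _
  unfold Spec_get_final_norm_indexs
  simp only [get_final_norm_indexs, get_final_norm_indexs_alt]
  rw [pvAccum_snd depths 0, zero_add, pvY_eq depths]
  rw [pvRun_eq_merge interval (pvAccum depths 0).1 _ 0 [[], [], [], []] (by omega) (by simp)]
  rw [pvMerge_four _ (by rw [pvStagesA_length]; simp)]
  have hr : List.range 4 = List.range' 0 (4 - 0) := by
    norm_num [List.range_eq_range']
  rw [hr]
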